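-- pv_equiv track=rewrite | github.com/nermadie/CodeForces_Solutions | CodeforcesRound998Div3/prob01.py | solve
-- ===== SOURCE A (Python) =====
-- def solve(a1, a2, a4, a5):
--   result = 0
--   for a3 in range(-100, 101):
--     cnt = 0
--     if a1 + a2 == a3:
--       cnt += 1
--     if a2 + a3 == a4:
--       cnt += 1
--     if a3 + a4 == a5:
--       cnt += 1
--     result = max(result, cnt)
--     if result == 3:
--       return result
--   return result
-- ===== SOURCE B (Python) =====
-- def solve(a1, a2, a4, a5):
--     # the three a3 values that would satisfy each equation
--     targets = [a1 + a2, a4 - a2, a5 - a4]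
--     kept = [t for t in targets if -100 <= t <= 100]
--     return max((kept.count(t) for t in kept), default=0)
-- ===== Notes on version B (the rewrite author's own statement) =====
-- stated objective: simpler
-- what changed: Replaces the 201-iteration scan over a3 with a direct computation: the three a3 targets each equation requires are tallied (restricted to the scanned range [-100,100]) and the largest multiplicity is returned.
import Mathlib
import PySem

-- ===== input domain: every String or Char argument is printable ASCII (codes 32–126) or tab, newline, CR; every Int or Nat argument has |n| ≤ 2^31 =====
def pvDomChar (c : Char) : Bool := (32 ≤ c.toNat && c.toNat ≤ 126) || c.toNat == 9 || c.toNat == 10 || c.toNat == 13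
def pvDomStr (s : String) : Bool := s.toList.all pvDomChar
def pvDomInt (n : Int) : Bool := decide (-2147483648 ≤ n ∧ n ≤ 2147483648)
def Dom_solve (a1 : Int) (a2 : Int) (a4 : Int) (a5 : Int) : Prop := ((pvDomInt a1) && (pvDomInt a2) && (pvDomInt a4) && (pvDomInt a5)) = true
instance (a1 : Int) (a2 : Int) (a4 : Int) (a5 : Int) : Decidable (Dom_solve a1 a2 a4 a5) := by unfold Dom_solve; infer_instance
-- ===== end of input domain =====

-- B replaces A's 201-iteration scan over a3 by tallying the three a3 targets
-- the equations require (kept when inside [-100,100]) and returning the largest multiplicity.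


-- ===== PORT A =====
-- the loop body's cnt: three sequential 'if … : cnt += 1'
def solveCnt (a1 : Int) (a2 : Int) (a4 : Int) (a5 : Int) (a3 : Int) : Int :=
  let cnt : Int := 0
  let cnt := if a1 + a2 = a3 then cnt + 1 else cnt
  let cnt := if a2 + a3 = a4 then cnt + 1 else cnt
  let cnt := if a3 + a4 = a5 then cnt + 1 else cnt
  cnt

-- the for-loop with its early 'return result' when result == 3
def solveLoop (a1 : Int) (a2 : Int) (a4 : Int) (a5 : Int) : List Int → Int → Int
  | [], result => result
  | a3 :: rest, result =>
      let result := max result (solveCnt a1 a2 a4 a5 a3)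
      if result = 3 then result else solveLoop a1 a2 a4 a5 rest result

def solve (a1 : Int) (a2 : Int) (a4 : Int) (a5 : Int) : Int :=
  solveLoop a1 a2 a4 a5 (PySem.List.pyRange (-100) 101 1) 0

-- ===== PORT B =====
def solve_alt (a1 : Int) (a2 : Int) (a4 : Int) (a5 : Int) : Int :=
  let targets : List Int := [a1 + a2, a4 - a2, a5 - a4]
  let kept := targets.filter (fun t => decide (-100 ≤ t ∧ t ≤ 100))
  -- max((kept.count(t) for t in kept), default=0)
  kept.foldl (fun acc t => max acc (PySem.List.count kept t)) 0

-- ===== PRECONDITION & SPEC =====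
def Spec_solve (a1 : Int) (a2 : Int) (a4 : Int) (a5 : Int) (out : Int) : Prop := out = solve_alt a1 a2 a4 a5
instance (a1 : Int) (a2 : Int) (a4 : Int) (a5 : Int) (out : Int) : Decidable (Spec_solve a1 a2 a4 a5 out) := by unfold Spec_solve; infer_instance

-- ===== CLAIM (what is proved, stated in full; the proofs are below) =====
def Claim_equal_solve : Prop := ∀ (a1 : Int) (a2 : Int) (a4 : Int) (a5 : Int), Dom_solve a1 a2 a4 a5 → Spec_solve a1 a2 a4 a5 (solve a1 a2 a4 a5)

-- ===== LEMMAS AND PROOFS =====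

-- cnt equals the multiplicity of a3 among the three targets
theorem solveCnt_eq_count (a1 a2 a4 a5 x : Int) :
    solveCnt a1 a2 a4 a5 x = (([a1 + a2, a4 - a2, a5 - a4] : List Int).count x : Int) := by
  simp [solveCnt, List.count_cons, List.count_nil]
  split_ifs <;> omega

theorem solveCnt_le_three (a1 a2 a4 a5 x : Int) : solveCnt a1 a2 a4 a5 x ≤ 3 := by
  simp only [solveCnt]
  split_ifs <;> omega

-- a running projected max is bounded by any common upper bound
theorem foldl_max_proj_le (f : Int → Int) (v : Int) :
    ∀ (xs : List Int) (a : Int), a ≤ v → (∀ x ∈ xs, f x ≤ v) →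
      xs.foldl (fun acc x => max acc (f x)) a ≤ v
  | [], a, ha, _ => ha
  | x :: xs, a, ha, hub => by
      simpa using foldl_max_proj_le f v xs (max a (f x))
        (by have := hub x (by simp); omega)
        (fun y hy => hub y (by simp [hy]))

-- a running projected max is its init or one of the projections
theorem foldl_max_proj_mem (f : Int → Int) :
    ∀ (xs : List Int) (a : Int),
      xs.foldl (fun acc x => max acc (f x)) a = a ∨
      ∃ x ∈ xs, xs.foldl (fun acc x => max acc (f x)) a = f x
  | [], a => Or.inl rfl
  | x :: xs, a => by
      rcases foldl_max_proj_mem f xs (max a (f x)) with h | ⟨y, hy, h⟩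
      · simp only [List.foldl_cons] at *
        rcases le_or_gt (f x) a with hle | hlt
        · left; rw [h]; omega
        · right; exact ⟨x, by simp, by rw [h]; omega⟩
      · right; exact ⟨y, by simp [hy], by simpa using h⟩

-- characterization of the projected running max from 0
theorem fold_max_char (f : Int → Int) (xs : List Int) (v : Int) (h0 : 0 ≤ v)
    (hub : ∀ x ∈ xs, f x ≤ v) (hmem : v = 0 ∨ ∃ x ∈ xs, f x = v) :
    xs.foldl (fun acc x => max acc (f x)) 0 = v := by
  have hle := foldl_max_proj_le f v xs 0 h0 hub
  have hge : v ≤ xs.foldl (fun acc x => max acc (f x)) 0 := by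
    rcases hmem with h | ⟨x, hx, h⟩
    · have := (PySem.List.le_foldl_max_int xs f 0).1; omega
    · have := (PySem.List.le_foldl_max_int xs f 0).2 x hx; omega
  omega

-- A's early-exiting loop equals the plain running max, as long as result ≤ 3
theorem solveLoop_eq_foldl (a1 a2 a4 a5 : Int) :
    ∀ (xs : List Int) (r : Int), r ≤ 3 →
      solveLoop a1 a2 a4 a5 xs r =
        xs.foldl (fun acc x => max acc (solveCnt a1 a2 a4 a5 x)) r
  | [], r, _ => rfl
  | x :: xs, r, hr => by
      simp only [solveLoop, List.foldl_cons]
      split_ifs with h3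
      · rw [h3]
        have hle := foldl_max_proj_le (solveCnt a1 a2 a4 a5) 3 xs 3 le_rfl
          (fun y _ => solveCnt_le_three a1 a2 a4 a5 y)
        have hge := (PySem.List.le_foldl_max_int xs (solveCnt a1 a2 a4 a5) 3).1
        omega
      · exact solveLoop_eq_foldl a1 a2 a4 a5 xs _
          (by have := solveCnt_le_three a1 a2 a4 a5 x; omega)

-- ===== VERDICT (by name: the statement is the Claim_ definition above) =====
theorem solve_spec : Claim_equal_solve := by
  intro a1 a2 a4 a5 _
  unfold Spec_solve solve solve_alt
  simp only [PySem.List.count_eq]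
  set kept := ([a1 + a2, a4 - a2, a5 - a4] : List Int).filter
      (fun t => decide (-100 ≤ t ∧ t ≤ 100)) with hkept
  rw [solveLoop_eq_foldl a1 a2 a4 a5 _ 0 (by omega)]
  -- facts about count and membership in kept
  have hkeptmem : ∀ t, t ∈ kept ↔ t ∈ ([a1 + a2, a4 - a2, a5 - a4] : List Int) ∧ (-100 ≤ t ∧ t ≤ 100) := by
    intro t; simp [hkept]
  have hcount_kept : ∀ t, (-100 ≤ t ∧ t ≤ 100) →
      kept.count t = ([a1 + a2, a4 - a2, a5 - a4] : List Int).count t := by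
    intro t ht
    rw [hkept, List.count_filter]
    simp [ht.1, ht.2]
  have hboth := PySem.List.le_foldl_max_int kept (fun t => ((kept.count t : Nat) : Int)) 0
  apply fold_max_char
  · have := hboth.1; omega
  · intro x hx
    rw [solveCnt_eq_count]
    rw [PySem.List.mem_pyRange_one] at hx
    by_cases hmem : x ∈ ([a1 + a2, a4 - a2, a5 - a4] : List Int)
    · have hxk : x ∈ kept := (hkeptmem x).2 ⟨hmem, by omega⟩
      have := hboth.2 x hxk
      have hc := hcount_kept x (by omega)
      simp only at this
      omega
    · have : ([a1 + a2, a4 - a2, a5 - a4] : List Int).count x = 0 := List.count_eq_zero.2 hmem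
      omega
  · rcases foldl_max_proj_mem (fun t => ((kept.count t : Nat) : Int)) kept 0 with h | ⟨t, ht, h⟩
    · left; omega
    · right
      obtain ⟨htm, htr⟩ := (hkeptmem t).1 ht
      refine ⟨t, ?_, ?_⟩
      · rw [PySem.List.mem_pyRange_one]; omega
      · rw [solveCnt_eq_count, ← hcount_kept t htr, h]
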